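-- pv_equiv track=rewrite | github.com/paiml/depyler | examples/hard_prac_mem_compact.py | mc_free_at_end
-- ===== SOURCE A (Python) =====
-- def mc_free_at_end(heap: list[int], heap_size: int) -> int:
--     """Count free cells at end of heap."""
--     count: int = 0
--     i: int = heap_size - 1
--     while i >= 0:
--         h: int = heap[i]
--         if h == 0:
--             count = count + 1
--         else:
--             return count
--         i = i - 1
--     return count
-- ===== SOURCE B (Python) =====
-- def mc_free_at_end(heap: list[int], heap_size: int) -> int:
--     """Count free cells at end of heap."""
--     if heap_size <= 0:
--         return 0
--     last_nonzero: int = -1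
--     for i in range(heap_size):
--         if heap[i] != 0:
--             last_nonzero = i
--     return heap_size - 1 - last_nonzero
-- ===== Notes on version B (the rewrite author's own statement) =====
-- stated objective: alternative
-- what changed: Replaces A's backward early-exit counting loop by a forward full pass that records the index of the last nonzero cell and returns heap_size - 1 - last_nonzero.
import Mathlib
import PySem

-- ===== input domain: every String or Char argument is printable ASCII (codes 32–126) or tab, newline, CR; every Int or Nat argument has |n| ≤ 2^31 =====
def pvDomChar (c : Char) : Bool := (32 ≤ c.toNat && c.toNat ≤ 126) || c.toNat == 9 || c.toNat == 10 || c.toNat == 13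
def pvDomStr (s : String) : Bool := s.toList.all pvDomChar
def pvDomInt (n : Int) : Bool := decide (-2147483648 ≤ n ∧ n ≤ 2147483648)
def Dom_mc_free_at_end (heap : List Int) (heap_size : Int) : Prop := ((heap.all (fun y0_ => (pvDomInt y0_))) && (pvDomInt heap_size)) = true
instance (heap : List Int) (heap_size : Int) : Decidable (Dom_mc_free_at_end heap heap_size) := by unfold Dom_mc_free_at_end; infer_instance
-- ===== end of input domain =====

-- B replaces A's backward early-exit counting loop by a forward full pass recording the
-- last nonzero index; same cost, different traversal (objective: alternative).

-- ===== PORT A =====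
-- A's while-loop: i counts down from heap_size-1; fuel = heap_size.toNat bounds the iterations.
def mcA_loop (heap : List Int) : Nat → Int → Int → Int
  | 0, _, count => count
  | fuel+1, i, count =>
    if i ≥ 0 then
      match PySem.List.pyGet? heap i with
      | some h => if h = 0 then mcA_loop heap fuel (i-1) (count+1) else count
      | none => count   -- IndexError in Python; excluded by Pre_
    else count

def mc_free_at_end (heap : List Int) (heap_size : Int) : Int :=
  mcA_loop heap heap_size.toNat (heap_size - 1) 0

-- ===== PORT B =====
def mc_free_at_end_alt (heap : List Int) (heap_size : Int) : Int :=
  if heap_size ≤ 0 then 0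
  else
    heap_size - 1 - (PySem.List.pyRange 0 heap_size 1).foldl
      (fun last i => if PySem.List.pyGetD heap i 0 ≠ 0 then i else last) (-1)

-- ===== PRECONDITION & SPEC =====
-- Pre_ excludes heap_size > len(heap), where both Pythons raise IndexError.
def Pre_mc_free_at_end (heap : List Int) (heap_size : Int) : Prop :=
  heap_size ≤ (heap.length : Int)
instance (heap : List Int) (heap_size : Int) : Decidable (Pre_mc_free_at_end heap heap_size) := by unfold Pre_mc_free_at_end; infer_instance

def pvWitness_mc_free_at_end : List Int × Int := ([3, 0, 0], 3)

def Spec_mc_free_at_end (heap : List Int) (heap_size : Int) (out : Int) : Prop := out = mc_free_at_end_alt heap heap_size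
instance (heap : List Int) (heap_size : Int) (out : Int) : Decidable (Spec_mc_free_at_end heap heap_size out) := by unfold Spec_mc_free_at_end; infer_instance

-- ===== CLAIM (what is proved, stated in full; the proofs are below) =====
def Claim_equal_mc_free_at_end : Prop := ∀ (heap : List Int) (heap_size : Int), Dom_mc_free_at_end heap heap_size → Pre_mc_free_at_end heap heap_size → Spec_mc_free_at_end heap heap_size (mc_free_at_end heap heap_size)

-- ===== LEMMAS AND PROOFS =====

-- A's counter accumulates: the count parameter shifts the result.
theorem mcA_loop_shift (heap : List Int) (fuel : Nat) :
    ∀ (i c : Int), mcA_loop heap fuel i c = c + mcA_loop heap fuel i 0 := by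
  induction fuel with
  | zero => intro i c; simp [mcA_loop]
  | succ n ih =>
    intro i c
    by_cases hi : i ≥ 0
    · cases h : PySem.List.pyGet? heap i with
      | none => simp [mcA_loop, hi, h]
      | some v =>
        by_cases hv : v = 0
        · simp only [mcA_loop, if_pos hi, h, hv, ite_true]
          rw [ih (i - 1) (c + 1), ih (i - 1) (0 + 1)]
          ring
        · simp [mcA_loop, hi, h, hv]
    · simp [mcA_loop, hi]

-- B's fold over pyRange 0 hs, written as a named function for the proofs.
def mcB_fold (heap : List Int) (hs : Int) : Int :=
  (PySem.List.pyRange 0 hs 1).foldl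
    (fun last i => if PySem.List.pyGetD heap i 0 ≠ 0 then i else last) (-1)

theorem mcB_fold_step (heap : List Int) (hs : Int) (h : 0 < hs) :
    mcB_fold heap hs =
      if PySem.List.pyGetD heap (hs - 1) 0 ≠ 0 then hs - 1 else mcB_fold heap (hs - 1) := by
  unfold mcB_fold
  have : hs = (hs - 1) + 1 := by ring
  rw [this, PySem.List.pyRange_one_succ_right (by omega)]
  simp [List.foldl_append]

theorem main_lemma (heap : List Int) : ∀ (n : Nat) (hs : Int), hs.toNat = n →
    hs ≤ (heap.length : Int) →
    mc_free_at_end heap hs = mc_free_at_end_alt heap hs := by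
  intro n
  induction n with
  | zero =>
    intro hs hn hlen
    have h0 : hs ≤ 0 := by omega
    unfold mc_free_at_end mc_free_at_end_alt
    rw [hn]
    simp [mcA_loop, if_pos h0]
  | succ n ih =>
    intro hs hn hlen
    have hpos : 0 < hs := by omega
    have hidx : PySem.List.pyGet? heap (hs - 1) = some heap[(hs-1).toNat] := by
      exact PySem.List.pyGet?_eq_some_getElem heap (by omega) (by omega)
    have hgetD : PySem.List.pyGetD heap (hs - 1) 0 = heap[(hs-1).toNat] := by
      exact PySem.List.pyGetD_eq_getElem heap 0 (by omega) (by omega)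
    unfold mc_free_at_end
    rw [hn]
    simp only [mcA_loop, if_pos (by omega : hs - 1 ≥ 0), hidx]
    by_cases hz : heap[(hs-1).toNat] = 0
    · simp only [if_pos hz]
      rw [mcA_loop_shift]
      have hrec : mcA_loop heap n (hs - 1 - 1) 0 = mc_free_at_end heap (hs - 1) := by
        unfold mc_free_at_end
        congr 1
        omega
      rw [hrec, ih (hs - 1) (by omega) (by omega)]
      unfold mc_free_at_end_alt
      rw [if_neg (by omega : ¬ hs ≤ 0)]
      show 1 + _ = hs - 1 - mcB_fold heap hs
      rw [mcB_fold_step heap hs hpos, hgetD]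
      simp only [hz, ne_eq, not_true_eq_false, if_false]
      by_cases h1 : hs - 1 ≤ 0
      · rw [if_pos h1]
        unfold mcB_fold
        rw [PySem.List.pyRange_one_eq_nil (by omega)]
        simp; omega
      · rw [if_neg h1]
        show 1 + (hs - 1 - 1 - mcB_fold heap (hs - 1)) = _
        ring
    · simp only [if_neg hz]
      unfold mc_free_at_end_alt
      rw [if_neg (by omega : ¬ hs ≤ 0)]
      show (0 : Int) = hs - 1 - mcB_fold heap hs
      rw [mcB_fold_step heap hs hpos, hgetD]
      simp only [ne_eq, hz, not_false_eq_true, if_true]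
      ring

-- ===== VERDICT (by name: the statement is the Claim_ definition above) =====
theorem mc_free_at_end_spec : Claim_equal_mc_free_at_end := by
  intro heap hs _ hpre
  exact main_lemma heap hs.toNat hs rfl hpre
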